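-- pv_equiv track=rewrite | github.com/Dennis7456/o-n-o-history-profile-blogs | enhanced_scraper.py | determine_significance
-- ===== SOURCE A (Python) =====
-- def determine_significance(content):
--     """Determine significance based on content analysis"""
--     content_lower = content.lower()
--
--     high_significance_terms = [
--         'solicitor general', 'supreme court', 'president', 'constitutional',
--         'landmark', 'historic', 'unprecedented'
--     ]
--
--     medium_significance_terms = [
--         'high court', 'court of appeal', 'government', 'legal', 'case'
--     ]
--
--     if any(term in content_lower for term in high_significance_terms):
--         return 'High - Significant legal or government matter'
--     elif any(term in content_lower for term in medium_significance_terms):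
--         return 'Medium - Important legal proceeding'
--     else:
--         return 'Standard - Regular legal activity'
-- ===== SOURCE B (Python) =====
-- # B: single position-indexed pass over the lowered content; at each index, prefix-match
-- # the keyword table and keep the running maximum level; finally index a label array.
-- _TABLE = [
--     ('solicitor general', 2), ('supreme court', 2), ('president', 2),
--     ('constitutional', 2), ('landmark', 2), ('historic', 2), ('unprecedented', 2),
--     ('high court', 1), ('court of appeal', 1), ('government', 1),
--     ('legal', 1), ('case', 1),
-- ]
--
-- _LABELS = [
--     'Standard - Regular legal activity',
--     'Medium - Important legal proceeding',
--     'High - Significant legal or government matter',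
-- ]
--
-- def determine_significance(content):
--     cl = content.lower()
--     best = 0
--     for i in range(len(cl)):
--         for term, k in _TABLE:
--             if cl.startswith(term, i):
--                 best = max(best, k)
--     return _LABELS[best]
-- ===== Notes on version B (the rewrite author's own statement) =====
-- stated objective: alternative
-- what changed: Replaced the two any(term in content) substring-membership branches by a single position-indexed scan of the lowered content that prefix-matches a (term, level) table at each index while accumulating the maximum level, which then indexes a label array.
import Mathlib
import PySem

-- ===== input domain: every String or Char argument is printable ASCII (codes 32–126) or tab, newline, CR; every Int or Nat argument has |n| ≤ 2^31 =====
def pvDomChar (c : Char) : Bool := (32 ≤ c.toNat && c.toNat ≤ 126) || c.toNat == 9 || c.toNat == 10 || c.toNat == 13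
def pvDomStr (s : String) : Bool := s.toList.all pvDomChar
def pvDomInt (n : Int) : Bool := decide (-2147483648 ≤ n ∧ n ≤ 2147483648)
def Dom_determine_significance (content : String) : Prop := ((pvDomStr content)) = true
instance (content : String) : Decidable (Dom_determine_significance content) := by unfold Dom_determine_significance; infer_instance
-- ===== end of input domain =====

-- B replaces the two any(substring-in) branches by one position-indexed scan of the lowered
-- content that prefix-matches a (term, level) table at each index, accumulating the maximum
-- level, then indexes a label array (objective: alternative, same cost).

-- ===== PORT A =====
def high_significance_terms : List String :=
  ["solicitor general", "supreme court", "president", "constitutional",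
   "landmark", "historic", "unprecedented"]

def medium_significance_terms : List String :=
  ["high court", "court of appeal", "government", "legal", "case"]

def determine_significance (content : String) : String :=
  let content_lower := PySem.Str.lower content
  if high_significance_terms.any (fun term => PySem.Str.isIn term content_lower) then
    "High - Significant legal or government matter"
  else if medium_significance_terms.any (fun term => PySem.Str.isIn term content_lower) then
    "Medium - Important legal proceeding"
  else
    "Standard - Regular legal activity"

-- ===== PORT B =====
def sig_table : List (List Char × Nat) :=
  [("solicitor general".toList, 2), ("supreme court".toList, 2), ("president".toList, 2),
   ("constitutional".toList, 2), ("landmark".toList, 2), ("historic".toList, 2),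
   ("unprecedented".toList, 2),
   ("high court".toList, 1), ("court of appeal".toList, 1), ("government".toList, 1),
   ("legal".toList, 1), ("case".toList, 1)]

def sig_labels : List String :=
  ["Standard - Regular legal activity",
   "Medium - Important legal proceeding",
   "High - Significant legal or government matter"]

-- inner loop of B: the best level of a term of the table starting at the current position
def levelHere (s : List Char) : Nat :=
  sig_table.foldl (fun acc p => if p.1.isPrefixOf s then max acc p.2 else acc) 0

-- outer loop of B: `for i in range(len(cl))` visiting each position = each suffix
def scanLevel : List Char → Nat
  | [] => 0
  | c :: rest => max (levelHere (c :: rest)) (scanLevel rest)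

def determine_significance_alt (content : String) : String :=
  let cl := PySem.Chars.lower content.toList
  sig_labels.getD (scanLevel cl) ""

-- ===== PRECONDITION & SPEC =====
def Spec_determine_significance (content : String) (out : String) : Prop := out = determine_significance_alt content
instance (content : String) (out : String) : Decidable (Spec_determine_significance content out) := by unfold Spec_determine_significance; infer_instance

-- ===== CLAIM =====
def Claim_equal_determine_significance : Prop := ∀ (content : String), Dom_determine_significance content → Spec_determine_significance content (determine_significance content)

-- ===== LEMMAS AND PROOFS =====

def highsC : List (List Char) := high_significance_terms.map String.toList
def medsC : List (List Char) := medium_significance_terms.map String.toList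

-- a fold over a constant-level tier equals an 'any' test
theorem foldStep (s : List Char) (l : List (List Char)) (k acc : Nat) :
    (l.map (fun t => (t, k))).foldl
      (fun acc p => if p.1.isPrefixOf s then max acc p.2 else acc) acc
    = if l.any (fun t => t.isPrefixOf s) then max acc k else acc := by
  induction l generalizing acc with
  | nil => simp
  | cons h t ih =>
    simp only [List.map, List.foldl, List.any_cons]
    by_cases hh : h.isPrefixOf s = true
    · simp only [hh, if_true, Bool.true_or]
      rw [ih]
      cases ht : t.any (fun t => t.isPrefixOf s) <;> simp
    · simp only [Bool.not_eq_true] at hh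
      simp only [hh, Bool.false_eq_true, if_false, Bool.false_or]
      exact ih acc

theorem levelHere_eq (s : List Char) :
    levelHere s = if highsC.any (fun t => t.isPrefixOf s) then 2
      else if medsC.any (fun t => t.isPrefixOf s) then 1 else 0 := by
  have htab : sig_table
      = highsC.map (fun t => (t, 2)) ++ medsC.map (fun t => (t, 1)) := rfl
  rw [levelHere, htab, List.foldl_append, foldStep, foldStep]
  cases hH : highsC.any (fun t => t.isPrefixOf s) <;>
    cases hM : medsC.any (fun t => t.isPrefixOf s) <;> simp

theorem anyOr (l : List (List Char)) (p q : List Char → Bool) :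
    l.any (fun t => p t || q t) = (l.any p || l.any q) := by
  induction l with
  | nil => rfl
  | cons x xs ih =>
    simp only [List.any_cons, ih]
    cases p x <;> cases q x <;> cases xs.any p <;> cases xs.any q <;> rfl

theorem isIn_cons (t : List Char) (c : Char) (r : List Char) :
    PySem.Chars.isIn t (c :: r) = (t.isPrefixOf (c :: r) || PySem.Chars.isIn t r) := by
  cases h : (t.isPrefixOf (c :: r) || PySem.Chars.isIn t r) with
  | true =>
    rw [PySem.Chars.isIn_iff_infix]
    rcases Bool.or_eq_true_iff.mp h with h1 | h1
    · exact (List.isPrefixOf_iff_prefix.mp h1).isInfix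
    · exact List.infix_cons_iff.mpr (Or.inr ((PySem.Chars.isIn_iff_infix t r).mp h1))
  | false =>
    rw [Bool.or_eq_false_iff] at h
    rw [PySem.Chars.isIn_eq_false_iff]
    intro hinf
    rcases List.infix_cons_iff.mp hinf with h1 | h1
    · exact absurd (List.isPrefixOf_iff_prefix.mpr h1) (by simp [h.1])
    · exact absurd ((PySem.Chars.isIn_iff_infix t r).mpr h1) (by simp [h.2])

theorem maxLevel (a b c d : Bool) :
    max (if a then 2 else if b then 1 else 0)
        (if c then 2 else if d then 1 else 0)
    = if (a || c) then 2 else if (b || d) then (1 : Nat) else 0 := by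
  cases a <;> cases b <;> cases c <;> cases d <;> rfl

theorem scanLevel_eq (s : List Char) :
    scanLevel s = if highsC.any (fun t => PySem.Chars.isIn t s) then 2
      else if medsC.any (fun t => PySem.Chars.isIn t s) then 1 else 0 := by
  induction s with
  | nil => decide
  | cons c r ih =>
    have hsplit : ∀ l : List (List Char),
        l.any (fun t => PySem.Chars.isIn t (c :: r))
        = (l.any (fun t => t.isPrefixOf (c :: r)) || l.any (fun t => PySem.Chars.isIn t r)) := by
      intro l
      rw [← anyOr]
      exact congrArg _ (funext fun t => isIn_cons t c r)
    rw [show scanLevel (c :: r) = max (levelHere (c :: r)) (scanLevel r) from rfl,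
      ih, levelHere_eq, hsplit, hsplit, maxLevel]

theorem determine_significance_eq (content : String) :
    determine_significance content = determine_significance_alt content := by
  have hbridge : ∀ (l : List String),
      l.any (fun term => PySem.Str.isIn term (PySem.Str.lower content))
      = (l.map String.toList).any
          (fun t => PySem.Chars.isIn t (PySem.Chars.lower content.toList)) := by
    intro l
    simp [PySem.Str.isIn_eq, List.any_map, Function.comp_def, PySem.Str.toList_lower]
  rw [determine_significance, determine_significance_alt]
  simp only [scanLevel_eq, hbridge]
  by_cases hH : ((high_significance_terms.map String.toList).any
      (fun t => PySem.Chars.isIn t (PySem.Chars.lower content.toList))) = true <;>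
    by_cases hM : ((medium_significance_terms.map String.toList).any
      (fun t => PySem.Chars.isIn t (PySem.Chars.lower content.toList))) = true <;>
    simp [highsC, medsC, hH, hM, sig_labels]

-- ===== VERDICT =====
theorem determine_significance_spec : Claim_equal_determine_significance := by
  intro content _
  exact determine_significance_eq content
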